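-- pv_equiv track=rewrite | github.com/belluga/delphi-ai | tools/todo_validation_bundle_export.py | extract_field_in_section
-- ===== SOURCE A (Python) =====
-- def clean_value(raw: str) -> str:
--     value = raw.strip()
--     while len(value) >= 2 and value[0] == value[-1] and value[0] in {"`", '"', "'"}:
--         value = value[1:-1].strip()
--     return value or "missing"
--
-- def find_section_start(lines: list[str], heading_prefix: str) -> int | None:
--     for index, line in enumerate(lines):
--         if line.strip().startswith(heading_prefix):
--             return index + 1
--     return None
--
-- def extract_field_in_section(lines: list[str], heading_prefix: str, label: str) -> str:
--     start = find_section_start(lines, heading_prefix)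
--     if start is None:
--         return "missing"
--
--     prefix = f"- **{label}:**"
--     for line in lines[start:]:
--         stripped = line.strip()
--         if stripped.startswith("## ") and not stripped.startswith(heading_prefix):
--             break
--         if stripped.startswith(prefix):
--             return clean_value(stripped[len(prefix) :])
--     return "missing"
-- ===== SOURCE B (Python) =====
-- def clean_value(raw: str) -> str:
--     value = raw.strip()
--     while len(value) >= 2 and value[0] == value[-1] and value[0] in {"`", '"', "'"}:
--         value = value[1:-1].strip()
--     return value or "missing"
--
--
-- def extract_field_in_section(lines: list[str], heading_prefix: str, label: str) -> str:
--     prefix = f"- **{label}:**"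
--     stripped = [line.strip() for line in lines]
--     heads = [i for i, s in enumerate(stripped) if s.startswith(heading_prefix)]
--     if not heads:
--         return "missing"
--     start = heads[0] + 1
--     breaks = [i for i, s in enumerate(stripped)
--               if s.startswith("## ") and not s.startswith(heading_prefix)]
--     end = next((i for i in breaks if i >= start), len(lines))
--     hits = [i for i, s in enumerate(stripped) if s.startswith(prefix)]
--     field = next((i for i in hits if start <= i < end), None)
--     if field is None:
--         return "missing"
--     return clean_value(stripped[field][len(prefix):])
-- ===== Notes on version B (the rewrite author's own statement) =====
-- stated objective: alternative
-- what changed: Instead of sequential scanning with a break, B precomputes the index lists of heading, boundary and field lines in separate passes and selects the answer by pure index arithmetic on the window [start, end).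
import Mathlib
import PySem

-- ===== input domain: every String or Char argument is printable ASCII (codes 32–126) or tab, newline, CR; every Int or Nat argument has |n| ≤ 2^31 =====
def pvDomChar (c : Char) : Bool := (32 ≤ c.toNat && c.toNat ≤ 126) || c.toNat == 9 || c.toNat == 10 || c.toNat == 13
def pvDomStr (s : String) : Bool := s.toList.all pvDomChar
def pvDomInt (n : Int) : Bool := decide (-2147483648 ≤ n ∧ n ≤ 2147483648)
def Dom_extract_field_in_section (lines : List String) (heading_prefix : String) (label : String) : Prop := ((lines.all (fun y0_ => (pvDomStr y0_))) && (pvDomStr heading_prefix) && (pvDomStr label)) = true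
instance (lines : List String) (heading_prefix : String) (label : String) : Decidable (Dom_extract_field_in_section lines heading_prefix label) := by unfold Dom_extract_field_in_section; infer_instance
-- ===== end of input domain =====

-- B replaces A's sequential scan-with-break by three independent index-list passes
-- (heading / boundary / field indices) plus pure index arithmetic on the window
-- [start, end) (objective: alternative algorithm, same cost); same results.

-- shared helper: clean_value is character-identical in Source A and Source B, ported once.
theorem pv_strip_length_le (v : List Char) : (PySem.Chars.strip v).length ≤ v.length := by
  unfold PySem.Chars.strip PySem.Chars.lstrip PySem.Chars.rstrip
  simp only [List.length_reverse]
  exact le_trans (List.length_dropWhile_le _ _)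
    (by simpa using List.length_dropWhile_le PySem.Chars.isspace v)

theorem pv_slice_mid_lt (v : List Char) (h : 2 ≤ v.length) :
    (PySem.Chars.slice v (some 1) (some (-1))).length < v.length := by
  rw [PySem.Chars.slice_eq_listSlice]
  unfold PySem.List.slice
  simp
  omega

-- while-loop of clean_value
def clean_loop (v : List Char) : List Char :=
  if h : 2 ≤ v.length ∧ PySem.List.pyGet? v 0 = PySem.List.pyGet? v (-1) ∧
      (PySem.List.pyGet? v 0 = some '`' ∨ PySem.List.pyGet? v 0 = some '"' ∨
       PySem.List.pyGet? v 0 = some '\'') then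
    clean_loop (PySem.Chars.strip (PySem.Chars.slice v (some 1) (some (-1))))
  else v
termination_by v.length
decreasing_by
  exact lt_of_le_of_lt (pv_strip_length_le _) (pv_slice_mid_lt v h.1)

def clean_value (raw : List Char) : String :=
  let v := clean_loop (PySem.Chars.strip raw)
  if v = [] then "missing" else String.ofList v

-- f"- **{label}:**"
def fieldPrefix (label : String) : List Char :=
  "- **".toList ++ label.toList ++ ":**".toList

-- ===== PORT A =====
def find_section_start_aux (heading_prefix : String) : List String → Int → Option Int
  | [], _ => none
  | l :: rest, i =>
    if PySem.Chars.startswith (PySem.Chars.strip l.toList) heading_prefix.toList then some (i + 1)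
    else find_section_start_aux heading_prefix rest (i + 1)

def find_section_start (lines : List String) (heading_prefix : String) : Option Int :=
  find_section_start_aux heading_prefix lines 0

def scanA (heading_prefix : String) (pfx : List Char) : List String → String
  | [] => "missing"
  | l :: rest =>
    let stripped := PySem.Chars.strip l.toList
    if PySem.Chars.startswith stripped "## ".toList &&
        !PySem.Chars.startswith stripped heading_prefix.toList then "missing"
    else if PySem.Chars.startswith stripped pfx then
      clean_value (PySem.Chars.slice stripped (some (pfx.length : Int)) none)
    else scanA heading_prefix pfx rest

def extract_field_in_section (lines : List String) (heading_prefix : String) (label : String) : String :=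
  match find_section_start lines heading_prefix with
  | none => "missing"
  | some start => scanA heading_prefix (fieldPrefix label) (PySem.List.slice lines (some start) none)

-- ===== PORT B =====
-- the comprehension [i for i, s in enumerate(ss) if q(s)], used three times in Source B
def pyIdxs (q : List Char → Bool) (ss : List (List Char)) : List Int :=
  ((PySem.List.enumerate ss 0).filter (fun p => q p.2)).map Prod.fst

def extract_field_in_section_alt (lines : List String) (heading_prefix : String) (label : String) : String :=
  let pfx := fieldPrefix label
  let stripped := lines.map (fun l => PySem.Chars.strip l.toList)
  let heads := pyIdxs (fun s => PySem.Chars.startswith s heading_prefix.toList) stripped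
  match heads.head? with
  | none => "missing"
  | some h0 =>
    let start := h0 + 1
    let breaks := pyIdxs (fun s => PySem.Chars.startswith s "## ".toList &&
      !PySem.Chars.startswith s heading_prefix.toList) stripped
    let e := (breaks.find? (fun i => decide (start ≤ i))).getD (lines.length : Int)
    let hits := pyIdxs (fun s => PySem.Chars.startswith s pfx) stripped
    match hits.find? (fun i => decide (start ≤ i) && decide (i < e)) with
    | none => "missing"
    | some f =>
      clean_value (PySem.Chars.slice (PySem.List.pyGetD stripped f []) (some (pfx.length : Int)) none)

-- ===== PRECONDITION & SPEC =====
def Spec_extract_field_in_section (lines : List String) (heading_prefix : String) (label : String) (out : String) : Prop := out = extract_field_in_section_alt lines heading_prefix label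
instance (lines : List String) (heading_prefix : String) (label : String) (out : String) : Decidable (Spec_extract_field_in_section lines heading_prefix label out) := by unfold Spec_extract_field_in_section; infer_instance

-- ===== CLAIM (what is proved, stated in full; the proofs are below) =====
def Claim_equal_extract_field_in_section : Prop := ∀ (lines : List String) (heading_prefix : String) (label : String), Dom_extract_field_in_section lines heading_prefix label → Spec_extract_field_in_section lines heading_prefix label (extract_field_in_section lines heading_prefix label)

-- ===== LEMMAS AND PROOFS =====

def stripF (l : String) : List Char := PySem.Chars.strip l.toList

def breakQ (hp : String) (s : List Char) : Bool :=
  PySem.Chars.startswith s "## ".toList && !PySem.Chars.startswith s hp.toList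

def fieldQ (pfx : List Char) (s : List Char) : Bool := PySem.Chars.startswith s pfx

-- the sequential "scan the section body" shape both programs reduce to
def win (hp : String) (pfx : List Char) : List (List Char) → String
  | [] => "missing"
  | x :: r =>
    if breakQ hp x then "missing"
    else if fieldQ pfx x then clean_value (PySem.Chars.slice x (some (pfx.length : Int)) none)
    else win hp pfx r

-- B's window computation over the stripped lines, parametrised by the start index
def bcore (hp : String) (pfx : List Char) (ss : List (List Char)) (start : Int) : String :=
  let e := ((pyIdxs (breakQ hp) ss).find? (fun i => decide (start ≤ i))).getD (ss.length : Int)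
  match (pyIdxs (fieldQ pfx) ss).find? (fun i => decide (start ≤ i) && decide (i < e)) with
  | none => "missing"
  | some f =>
    clean_value (PySem.Chars.slice (PySem.List.pyGetD ss f []) (some (pfx.length : Int)) none)

theorem enumerate_shift {α : Type} (ss : List α) :
    ∀ s : Int, PySem.List.enumerate ss (s + 1) =
      (PySem.List.enumerate ss s).map (fun p => (p.1 + 1, p.2)) := by
  induction ss with
  | nil => intro s; simp [PySem.List.enumerate_nil]
  | cons x r ih =>
    intro s
    rw [PySem.List.enumerate_cons, PySem.List.enumerate_cons, ih (s + 1)]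
    simp

theorem pyIdxs_nil (q : List Char → Bool) : pyIdxs q [] = [] := by
  simp [pyIdxs, PySem.List.enumerate_nil]

theorem pyIdxs_cons (q : List Char → Bool) (x : List Char) (ss : List (List Char)) :
    pyIdxs q (x :: ss) = (if q x then [(0 : Int)] else []) ++ (pyIdxs q ss).map (· + 1) := by
  unfold pyIdxs
  rw [PySem.List.enumerate_cons, show (0 : Int) + 1 = 0 + 1 by ring, enumerate_shift ss 0]
  by_cases h : q x <;> simp [h, List.filter_map, List.map_map, Function.comp_def]

theorem pyIdxs_nonneg (q : List Char → Bool) :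
    ∀ ss, ∀ i ∈ pyIdxs q ss, 0 ≤ i := by
  intro ss
  induction ss with
  | nil => simp [pyIdxs_nil]
  | cons x r ih =>
    intro i hi
    rw [pyIdxs_cons] at hi
    rcases List.mem_append.1 hi with h | h
    · split_ifs at h <;> simp_all
    · obtain ⟨j, hj, rfl⟩ := List.mem_map.1 h
      have := ih j hj; omega

theorem find?_congr_mem {α : Type} (L : List α) (p q : α → Bool)
    (h : ∀ x ∈ L, p x = q x) : L.find? p = L.find? q := by
  induction L with
  | nil => rfl
  | cons x r ih =>
    simp only [List.find?_cons, h x (by simp)]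
    split <;> [rfl; exact ih (fun y hy => h y (by simp [hy]))]

theorem pyGetD_cons_succ (x : List Char) (ss : List (List Char)) (f : Int) (hf : 0 ≤ f) :
    PySem.List.pyGetD (x :: ss) (f + 1) [] = PySem.List.pyGetD ss f [] := by
  have h1 : f = ((f.toNat : Nat) : Int) := by omega
  have h2 : f + 1 = (((f.toNat + 1 : Nat)) : Int) := by omega
  rw [h2, PySem.List.pyGetD_natCast, h1, PySem.List.pyGetD_natCast]
  simp
  rw [show max f 0 = f by omega]

-- find? over the (+1)-shifted index list skips an ineligible head
theorem find?_opt_head (c : Bool) (L : List Int) (p : Int → Bool) (h : p 0 = false) :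
    ((if c then [(0 : Int)] else []) ++ L).find? p = L.find? p := by
  cases c <;> simp [List.find?_cons, h]

theorem find?_shift (L : List Int) (hL : ∀ j ∈ L, 0 ≤ j) (t t' e e' : Int)
    (ht : ∀ j : Int, 0 ≤ j → ((t ≤ j + 1) ↔ (t' ≤ j)))
    (hee : ∀ j : Int, 0 ≤ j → ((j + 1 < e) ↔ (j < e'))) :
    (L.map (· + 1)).find? (fun i => decide (t ≤ i) && decide (i < e)) =
      (L.find? (fun j => decide (t' ≤ j) && decide (j < e'))).map (· + 1) := by
  rw [List.find?_map]
  rw [find?_congr_mem L _ (fun j => decide (t' ≤ j) && decide (j < e'))]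
  intro j hj
  have h0 := hL j hj
  simp only [Function.comp]
  by_cases h1 : t' ≤ j <;> by_cases h2 : j < e' <;>
    simp [h1, h2, (ht j h0), (hee j h0)]

theorem find?_shift_le (L : List Int) (hL : ∀ j ∈ L, 0 ≤ j) (t t' : Int)
    (ht : ∀ j : Int, 0 ≤ j → ((t ≤ j + 1) ↔ (t' ≤ j))) :
    (L.map (· + 1)).find? (fun i => decide (t ≤ i)) =
      (L.find? (fun j => decide (t' ≤ j))).map (· + 1) := by
  rw [List.find?_map]
  rw [find?_congr_mem L _ (fun j => decide (t' ≤ j))]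
  intro j hj
  have h0 := hL j hj
  simp only [Function.comp]
  by_cases h1 : t' ≤ j <;> simp [h1, (ht j h0)]

-- B's window computation equals the sequential scan of the suffix
theorem getD_shift (o : Option Int) (a : Int) : ((o.map (· + 1)).getD (a + 1)) = o.getD a + 1 := by
  cases o <;> simp

theorem bcore_eq_win (hp : String) (pfx : List Char) :
    ∀ (ss : List (List Char)) (n : Nat), bcore hp pfx ss (n : Int) = win hp pfx (ss.drop n) := by
  intro ss
  induction ss with
  | nil => intro n; simp [bcore, pyIdxs_nil, win]
  | cons x r ih =>
    intro n
    have hBne : ∀ j ∈ pyIdxs (breakQ hp) r, 0 ≤ j := pyIdxs_nonneg _ r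
    have hFne : ∀ j ∈ pyIdxs (fieldQ pfx) r, 0 ≤ j := pyIdxs_nonneg _ r
    have hlen : (((x :: r).length : Nat) : Int) = ((r.length : Nat) : Int) + 1 := by simp
    cases n with
    | zero =>
      simp only [bcore, Nat.cast_zero, List.drop_zero]
      by_cases hb : breakQ hp x = true
      · -- break at the head: e = 0, the window [0,0) is empty
        have hE : ((pyIdxs (breakQ hp) (x :: r)).find?
              (fun i => decide ((0:Int) ≤ i))).getD (((x :: r).length : Nat) : Int) = 0 := by
          rw [pyIdxs_cons]
          simp [hb, List.find?_cons]
        have hN : (pyIdxs (fieldQ pfx) (x :: r)).find?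
              (fun i => decide ((0:Int) ≤ i) && decide (i < 0)) = none := by
          rw [List.find?_eq_none]
          intro i hi
          have := pyIdxs_nonneg (fieldQ pfx) (x :: r) i hi
          simp only [Bool.and_eq_true, decide_eq_true_eq, not_and]
          intro _
          omega
        rw [hE, hN]
        simp [win, hb]
      · have hb' : breakQ hp x = false := by simpa using hb
        by_cases hf : fieldQ pfx x = true
        · -- field at the head: index 0 is selected, and 0 < e
          have hegt : (0:Int) < ((pyIdxs (breakQ hp) (x :: r)).find?
                (fun i => decide ((0:Int) ≤ i))).getD (((x :: r).length : Nat) : Int) := by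
            rw [pyIdxs_cons, hb']
            simp only [Bool.false_eq_true, if_false, List.nil_append]
            cases hfd : ((pyIdxs (breakQ hp) r).map (· + 1)).find?
                (fun i => decide ((0:Int) ≤ i)) with
            | none =>
              rw [hlen]
              simp only [Option.getD_none]
              omega
            | some b =>
              have hmem := List.mem_of_find?_eq_some hfd
              obtain ⟨j, hj, rfl⟩ := List.mem_map.1 hmem
              have := hBne j hj
              simp only [Option.getD_some]
              omega
          rw [pyIdxs_cons (fieldQ pfx)]
          simp only [hf, eq_self_iff_true, if_true]
          rw [List.singleton_append, List.find?_cons]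
          rw [show (decide ((0:Int) ≤ 0) && decide ((0:Int) <
              ((pyIdxs (breakQ hp) (x :: r)).find?
                (fun i => decide ((0:Int) ≤ i))).getD (((x :: r).length : Nat) : Int)))
              = true by simp; simpa using hegt]
          simp [win, hb', hf, PySem.List.pyGetD_zero_cons]
        · -- neither: shift everything by one and use the tail at start 0
          have hf' : fieldQ pfx x = false := by simpa using hf
          have hE : ((pyIdxs (breakQ hp) (x :: r)).find?
              (fun i => decide ((0:Int) ≤ i))).getD (((x :: r).length : Nat) : Int) =
              (((pyIdxs (breakQ hp) r).find?
                (fun j => decide ((0:Int) ≤ j))).getD ((r.length : Nat) : Int)) + 1 := by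
            rw [pyIdxs_cons, hb']
            simp only [Bool.false_eq_true, if_false, List.nil_append]
            rw [find?_shift_le _ hBne (0:Int) (0:Int) (by intro j hj; omega), hlen, getD_shift]
          rw [hE, pyIdxs_cons (fieldQ pfx), hf']
          simp only [Bool.false_eq_true, if_false, List.nil_append]
          rw [find?_shift _ hFne (0:Int) (0:Int)
            ((((pyIdxs (breakQ hp) r).find?
                (fun j => decide ((0:Int) ≤ j))).getD ((r.length : Nat) : Int)) + 1)
            (((pyIdxs (breakQ hp) r).find?
                (fun j => decide ((0:Int) ≤ j))).getD ((r.length : Nat) : Int))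
            (by intro j hj; omega) (by intro j hj; omega)]
          have hIH := ih 0
          simp only [bcore, Nat.cast_zero, List.drop_zero] at hIH
          cases hres : (pyIdxs (fieldQ pfx) r).find?
              (fun j => decide ((0:Int) ≤ j) &&
                decide (j < ((pyIdxs (breakQ hp) r).find?
                  (fun j => decide ((0:Int) ≤ j))).getD ((r.length : Nat) : Int))) with
          | none =>
            rw [hres] at hIH
            simp only [Option.map_none]
            rw [show win hp pfx (x :: r) = win hp pfx r by simp [win, hb', hf']]
            exact hIH
          | some f =>
            rw [hres] at hIH
            have hf0 : 0 ≤ f := hFne f (List.mem_of_find?_eq_some hres)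
            simp only [Option.map_some]
            rw [pyGetD_cons_succ x r f hf0]
            rw [show win hp pfx (x :: r) = win hp pfx r by simp [win, hb', hf']]
            exact hIH
    | succ m =>
      -- start ≥ 1: the head index 0 is ineligible in every index list
      simp only [bcore]
      push_cast
      have hm0 : ¬((m:Int) + 1 ≤ 0) := by omega
      have hp0 : ∀ e : Int, (fun i => decide (((m:Int) + 1) ≤ i) && decide (i < e)) 0 = false := by
        intro e; simp [hm0]
      have hp0' : (fun i => decide (((m:Int) + 1) ≤ i)) (0:Int) = false := by
        simp [hm0]
      have hE : ((pyIdxs (breakQ hp) (x :: r)).find?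
          (fun i => decide (((m:Int) + 1) ≤ i))).getD (((x :: r).length : Nat) : Int) =
          (((pyIdxs (breakQ hp) r).find?
            (fun j => decide ((m:Int) ≤ j))).getD ((r.length : Nat) : Int)) + 1 := by
        rw [pyIdxs_cons, find?_opt_head _ _ _ hp0']
        rw [find?_shift_le _ hBne ((m:Int) + 1) ((m:Int)) (by intro j hj; omega), hlen, getD_shift]
      rw [hE, pyIdxs_cons (fieldQ pfx), find?_opt_head _ _ _ (hp0 _)]
      rw [find?_shift _ hFne ((m:Int) + 1) ((m:Int))
        ((((pyIdxs (breakQ hp) r).find?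
            (fun j => decide ((m:Int) ≤ j))).getD ((r.length : Nat) : Int)) + 1)
        (((pyIdxs (breakQ hp) r).find?
            (fun j => decide ((m:Int) ≤ j))).getD ((r.length : Nat) : Int))
        (by intro j hj; omega) (by intro j hj; omega)]
      have hIH := ih m
      simp only [bcore] at hIH
      rw [show (x :: r).drop (m + 1) = r.drop m from rfl]
      cases hres : (pyIdxs (fieldQ pfx) r).find?
          (fun j => decide ((m:Int) ≤ j) &&
            decide (j < ((pyIdxs (breakQ hp) r).find?
              (fun j => decide ((m:Int) ≤ j))).getD ((r.length : Nat) : Int))) with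
      | none =>
        rw [hres] at hIH
        simp only [Option.map_none]
        exact hIH
      | some f =>
        rw [hres] at hIH
        have hf0 : 0 ≤ f := hFne f (List.mem_of_find?_eq_some hres)
        simp only [Option.map_some]
        rw [pyGetD_cons_succ x r f hf0]
        exact hIH

theorem scanA_eq_win (hp : String) (pfx : List Char) :
    ∀ ls : List String, scanA hp pfx ls = win hp pfx (ls.map stripF) := by
  intro ls
  induction ls with
  | nil => rfl
  | cons l rest ih =>
    simp only [scanA, List.map_cons, win, stripF, breakQ, fieldQ]
    split_ifs <;> simp_all

theorem fss_aux_shift (hp : String) :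
    ∀ ls (i : Int), find_section_start_aux hp ls (i + 1) =
      (find_section_start_aux hp ls i).map (· + 1) := by
  intro ls
  induction ls with
  | nil => intro i; rfl
  | cons l rest ih =>
    intro i
    simp only [find_section_start_aux]
    split_ifs with h
    · rfl
    · exact ih (i + 1)

theorem fss_eq_heads (hp : String) :
    ∀ lines : List String, find_section_start lines hp =
      (pyIdxs (fun s => PySem.Chars.startswith s hp.toList) (lines.map stripF)).head?.map (· + 1) := by
  intro lines
  induction lines with
  | nil => simp [find_section_start, find_section_start_aux, pyIdxs_nil]
  | cons l rest ih =>
    simp only [find_section_start, find_section_start_aux, List.map_cons, pyIdxs_cons, stripF]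
    by_cases h : PySem.Chars.startswith (PySem.Chars.strip l.toList) hp.toList
    · simp [h]
    · simp only [h, if_false, Bool.false_eq_true, List.nil_append]
      rw [show find_section_start_aux hp rest ((0:Int) + 1) =
            (find_section_start_aux hp rest 0).map (· + 1) from fss_aux_shift hp rest 0]
      have ih' : find_section_start_aux hp rest 0 =
          (pyIdxs (fun s => PySem.Chars.startswith s hp.toList) (rest.map stripF)).head?.map (· + 1) := ih
      rw [ih']
      simp [List.head?_map, Option.map_map, Function.comp_def, stripF]

theorem pv_main (hp label : String) (lines : List String) :
    extract_field_in_section lines hp label = extract_field_in_section_alt lines hp label := by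
  simp only [extract_field_in_section, extract_field_in_section_alt]
  rw [show (lines.map (fun l => PySem.Chars.strip l.toList)) = lines.map stripF from rfl]
  rw [fss_eq_heads hp lines]
  cases hh : (pyIdxs (fun s => PySem.Chars.startswith s hp.toList) (lines.map stripF)).head? with
  | none => simp
  | some h0 =>
    have hh0 : 0 ≤ h0 := by
      cases hls : pyIdxs (fun s => PySem.Chars.startswith s hp.toList) (lines.map stripF) with
      | nil => rw [hls] at hh; simp at hh
      | cons a t =>
        rw [hls] at hh
        simp only [List.head?_cons, Option.some.injEq] at hh
        subst hh
        exact pyIdxs_nonneg _ (lines.map stripF) a (by rw [hls]; simp)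
    simp only [Option.map_some]
    -- A side: the slice is a drop, then the scan is win of the dropped stripped lines
    rw [PySem.List.slice_from lines (by omega : (0:Int) ≤ h0 + 1)]
    rw [scanA_eq_win, List.map_drop]
    -- B side: bcore at start h0+1
    have hb := bcore_eq_win hp (fieldPrefix label) (lines.map stripF) (h0 + 1).toNat
    have hcast : (((h0 + 1).toNat : Nat) : Int) = h0 + 1 := by omega
    rw [hcast] at hb
    simp only [bcore, List.length_map] at hb
    rw [show breakQ hp = (fun s => PySem.Chars.startswith s "## ".toList &&
          !PySem.Chars.startswith s hp.toList) from rfl,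
        show fieldQ (fieldPrefix label) =
          (fun s => PySem.Chars.startswith s (fieldPrefix label)) from rfl] at hb
    rw [← hb]

-- ===== VERDICT (by name: the statement is the Claim_ definition above) =====
theorem extract_field_in_section_spec : Claim_equal_extract_field_in_section := by
  intro lines hp label _
  unfold Spec_extract_field_in_section
  exact pv_main hp label lines
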